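-- pv_equiv track=rewrite | github.com/FireChickenProductivity/Talon-Voice-EquatIO-Commands | EquatIO/TextFieldNavigation.py | distance_to_nth_word_left
-- ===== SOURCE A (Python) =====
-- def distance_to_nth_word_left(text: str,num_words:int = 1):
--     words = text.split(" ")
--     if len(words) <= num_words: raise ValueError
--     else:
--         # initalize distance to number of words to include spaces
--         distance = num_words
--         # add the length of the words included
--         for i in range(num_words):
--             distance += len(words[-i-1])
--         return distance
-- ===== SOURCE B (Python) =====
-- def distance_to_nth_word_left(text: str, num_words: int = 1):
--     # the cursor crosses num_words spaces, one character each...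
--     distance = num_words
--     to_cross = num_words
--     i = len(text) - 1
--     while to_cross > 0:
--         if i < 0:
--             raise ValueError
--         if text[i] == " ":
--             to_cross -= 1
--         else:
--             # ...plus one character for every letter of the words passed
--             distance += 1
--         i -= 1
--     return distance
-- ===== Notes on version B (the rewrite author's own statement) =====
-- stated objective: alternative
-- what changed: B replaces A's split-the-whole-text-then-sum-word-lengths computation with a single right-to-left character scan that counts word characters while decrementing a spaces-to-cross counter; Pre_ excludes exactly the inputs where A raises ValueError (fewer spaces than num_words).
import Mathlib
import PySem

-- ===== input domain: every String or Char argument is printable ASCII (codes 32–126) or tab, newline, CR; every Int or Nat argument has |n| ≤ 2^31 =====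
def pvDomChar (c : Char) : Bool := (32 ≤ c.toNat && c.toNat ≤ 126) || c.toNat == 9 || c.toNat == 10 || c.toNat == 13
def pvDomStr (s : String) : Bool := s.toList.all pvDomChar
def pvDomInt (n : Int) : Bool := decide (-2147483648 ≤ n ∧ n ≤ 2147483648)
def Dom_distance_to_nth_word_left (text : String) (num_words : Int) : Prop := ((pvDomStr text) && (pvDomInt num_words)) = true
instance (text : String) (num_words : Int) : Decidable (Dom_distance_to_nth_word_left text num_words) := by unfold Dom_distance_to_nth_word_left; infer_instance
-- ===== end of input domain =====

-- B replaces A's split-then-sum-word-lengths with a single right-to-left character scan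
-- counting word characters while decrementing a spaces-to-cross counter
-- (objective: alternative decomposition, same cost).

-- ===== PORT A =====
def distance_to_nth_word_left (text : String) (num_words : Int) : Int :=
  let words := PySem.Chars.splitOn text.toList " ".toList
  if (words.length : Int) ≤ num_words then 0  -- Python: raise ValueError (excluded by Pre_)
  else
    (PySem.List.pyRange 0 num_words).foldl
      (fun distance i => distance + (((PySem.List.pyGet? words (-i - 1)).getD []).length : Int))
      num_words

-- ===== PORT B =====
-- B's while-loop: scan from the right while to_cross > 0, counting word characters.
def pvAltGo (cs : List Char) (distance to_cross : Int) : Int :=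
  match cs with
  | [] =>
    if 0 < to_cross then 0  -- Python: raise ValueError (excluded by Pre_)
    else distance
  | c :: rest =>
    if 0 < to_cross then
      if c = ' ' then pvAltGo rest distance (to_cross - 1)
      else pvAltGo rest (distance + 1) to_cross
    else distance

def distance_to_nth_word_left_alt (text : String) (num_words : Int) : Int :=
  pvAltGo text.toList.reverse num_words num_words

-- ===== PRECONDITION & SPEC =====
-- Pre_ excludes exactly the inputs where Python A raises ValueError:
-- A raises iff the number of space characters in text is smaller than num_words.
def Pre_distance_to_nth_word_left (text : String) (num_words : Int) : Prop :=
  num_words ≤ (text.toList.count ' ' : Int)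
instance (text : String) (num_words : Int) : Decidable (Pre_distance_to_nth_word_left text num_words) := by
  unfold Pre_distance_to_nth_word_left; infer_instance

def pvWitness_distance_to_nth_word_left : String × Int := ("a b", 1)

def Spec_distance_to_nth_word_left (text : String) (num_words : Int) (out : Int) : Prop :=
  out = distance_to_nth_word_left_alt text num_words
instance (text : String) (num_words : Int) (out : Int) : Decidable (Spec_distance_to_nth_word_left text num_words out) := by
  unfold Spec_distance_to_nth_word_left; infer_instance

-- ===== CLAIM (what is proved, stated in full; the proofs are below) =====
def Claim_equal_distance_to_nth_word_left : Prop := ∀ (text : String) (num_words : Int), Dom_distance_to_nth_word_left text num_words → Pre_distance_to_nth_word_left text num_words → Spec_distance_to_nth_word_left text num_words (distance_to_nth_word_left text num_words)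

-- ===== LEMMAS AND PROOFS =====

-- A simple structural split on a single character (proof-side model of Python's text.split(" ")).
def pvSp (c : Char) : List Char → List Char × List (List Char)
  | [] => ([], [])
  | a :: rest =>
    let p := pvSp c rest
    if a = c then ([], p.1 :: p.2) else (a :: p.1, p.2)

def pvWords (c : Char) (l : List Char) : List (List Char) :=
  (pvSp c l).1 :: (pvSp c l).2

lemma pvSp_cons (c a : Char) (rest : List Char) :
    pvSp c (a :: rest) =
      if a = c then ([], (pvSp c rest).1 :: (pvSp c rest).2)
      else (a :: (pvSp c rest).1, (pvSp c rest).2) := rfl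

-- fuel elimination: PySem's splitOn on a single-character separator is pvSp
lemma pvSplitOn_go_eq (c : Char) :
    ∀ (l : List Char) (fuel : Nat) (cur : List Char) (acc : List (List Char)),
      l.length < fuel →
      PySem.Chars.splitOn.go [c] fuel l cur acc =
        acc.reverse ++ (cur.reverse ++ (pvSp c l).1) :: (pvSp c l).2 := by
  intro l
  induction l with
  | nil =>
    intro fuel cur acc h
    match fuel with
    | fuel + 1 => rw [PySem.Chars.splitOn.go.eq_def]; simp [pvSp]
  | cons a rest ih =>
    intro fuel cur acc h
    match fuel with
    | fuel + 1 =>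
      rw [PySem.Chars.splitOn.go.eq_def]
      simp only [List.isPrefixOf, Bool.and_true]
      by_cases hac : a = c
      · subst hac
        simp only [BEq.rfl, if_pos, List.length_cons, List.length_nil, Nat.zero_add,
          List.drop_succ_cons, List.drop_zero]
        rw [ih fuel [] (cur.reverse :: acc) (by simpa using Nat.lt_of_succ_lt_succ h)]
        simp [pvSp_cons]
      · have hba : (c == a) = false := beq_eq_false_iff_ne.mpr (Ne.symm hac)
        simp only [hba, Bool.false_eq_true, if_false]
        rw [ih fuel (a :: cur) acc (by simpa using Nat.lt_of_succ_lt_succ h)]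
        simp [pvSp_cons, hac]

lemma pvSplitOn_eq (c : Char) (l : List Char) :
    PySem.Chars.splitOn l [c] = pvWords c l := by
  unfold PySem.Chars.splitOn
  rw [pvSplitOn_go_eq c l (l.length + 1) [] [] (Nat.lt_succ_self _)]
  simp [pvWords]

-- the number of separator pieces equals the count of the separator character
lemma pvSp_count (c : Char) : ∀ l : List Char, (pvSp c l).2.length = l.count c := by
  intro l
  induction l with
  | nil => simp [pvSp]
  | cons a rest ih =>
    by_cases hac : a = c
    · subst hac; simp [pvSp_cons, ih]
    · simp [pvSp_cons, hac, ih]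

-- total length: word lengths + separators = length of the list
lemma pvSp_sum (c : Char) : ∀ l : List Char,
    ((pvWords c l).map List.length).sum + l.count c = l.length := by
  intro l
  induction l with
  | nil => simp [pvWords, pvSp]
  | cons a rest ih =>
    simp only [pvWords, List.map_cons, List.sum_cons] at ih ⊢
    by_cases hac : a = c
    · subst hac
      simp [pvSp_cons]
      omega
    · simp [pvSp_cons, hac]
      omega

-- position (1-based, in characters) of the j-th space of a list, scanned left to right
def pvNthSp (j : Int) : List Char → Int
  | [] => 0
  | a :: rest =>
    if a = ' ' then (if j = 1 then 1 else 1 + pvNthSp (j - 1) rest)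
    else 1 + pvNthSp j rest

-- exhausted budget: with no spaces left to cross the scan stops at once
lemma pvAltGo_done (l : List Char) (d t : Int) (h : ¬ 0 < t) : pvAltGo l d t = d := by
  cases l with
  | nil => simp [pvAltGo, h]
  | cons c rest => simp [pvAltGo, h]

-- B's scan: distance grows by the number of word characters up to the t-th space,
-- i.e. by pvNthSp t l - t
lemma pvAltGo_eq_nthSp : ∀ (l : List Char) (d t : Int),
    1 ≤ t → t ≤ (l.count ' ' : Int) →
    pvAltGo l d t = d + pvNthSp t l - t := by
  intro l
  induction l with
  | nil => intro d t h1 h2; simp at h2; omega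
  | cons a rest ih =>
    intro d t h1 h2
    by_cases ha : a = ' '
    · subst ha
      simp only [pvAltGo, if_pos (by omega : (0:Int) < t), if_true]
      by_cases ht : t = 1
      · subst ht
        rw [(by omega : (1:Int) - 1 = 0), pvAltGo_done rest d 0 (by omega), pvNthSp]
        simp
      · have h2' : t - 1 ≤ (rest.count ' ' : Int) := by simp at h2; omega
        rw [ih d (t - 1) (by omega) h2', pvNthSp, if_pos rfl, if_neg ht]
        ring
    · have h2' : t ≤ (rest.count ' ' : Int) := by simp [ha] at h2; omega
      simp only [pvAltGo, if_pos (by omega : (0:Int) < t), if_neg ha]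
      rw [ih (d + 1) t h1 h2', pvNthSp, if_neg ha]
      ring

-- the k-th space lies within r: appending anything after r does not move it
lemma pvNthSp_append (r t : List Char) : ∀ k : Nat, 1 ≤ k → k ≤ r.count ' ' →
    pvNthSp (k : Int) (r ++ t) = pvNthSp (k : Int) r := by
  induction r with
  | nil => intro k h1 h2; simp at h2; omega
  | cons b r' ih =>
    intro k h1 h2
    by_cases hb : b = ' '
    · subst hb
      by_cases hk : k = 1
      · simp [pvNthSp, hk]
      · have h2' : k - 1 ≤ r'.count ' ' := by simp at h2; omega
        have hne : ¬ ((k : Int) = 1) := by exact_mod_cast hk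
        have hcast : (k : Int) - 1 = ((k - 1 : Nat) : Int) := by omega
        simp [pvNthSp, hne, hcast, ih (k - 1) (by omega) h2']
    · have h2' : k ≤ r'.count ' ' := by
        simp [hb] at h2; omega
      simp [pvNthSp, hb, ih k h1 h2']

-- r holds exactly k-1 spaces: the k-th space is the appended one, at position r.length + 1
lemma pvNthSp_last (k : Nat) : ∀ r : List Char, 1 ≤ k → r.count ' ' = k - 1 →
    pvNthSp (k : Int) (r ++ [' ']) = (r.length : Int) + 1 := by
  intro r
  induction r generalizing k with
  | nil =>
    intro h1 h2
    simp at h2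
    simp [pvNthSp, (by omega : k = 1)]
  | cons b r' ih =>
    intro h1 h2
    by_cases hb : b = ' '
    · subst hb
      simp only [List.count_cons_self] at h2
      have hk2 : 2 ≤ k := by omega
      have hne : ¬ ((k : Int) = 1) := by exact_mod_cast (by omega : ¬ k = 1)
      have hcast : (k : Int) - 1 = ((k - 1 : Nat) : Int) := by omega
      simp [pvNthSp, hne, hcast, ih (k - 1) (by omega) (by omega)]
      ring
    · simp [hb] at h2
      simp [pvNthSp, hb, ih k h1 h2]
      omega

-- central bridge: the position of the k-th space from the RIGHT equals
-- k plus the summed lengths of the last k words of the split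
lemma pvNthSp_reverse (l : List Char) : ∀ k : Nat, 1 ≤ k → k ≤ l.count ' ' →
    pvNthSp (k : Int) l.reverse =
      (k : Int) + ((((pvWords ' ' l).map List.length).reverse.take k).sum : Int) := by
  induction l with
  | nil => intro k h1 h2; simp at h2; omega
  | cons a xs ih =>
    intro k h1 h2
    by_cases ha : a = ' '
    · subst ha
      rw [List.count_cons_self] at h2
      have hrev : (' ' :: xs).reverse = xs.reverse ++ [' '] := by simp
      have hw : pvWords ' ' (' ' :: xs) = [] :: pvWords ' ' xs := by
        simp [pvWords, pvSp]
      have hlen : ((pvWords ' ' xs).map List.length).reverse.length = xs.count ' ' + 1 := by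
        simp [pvWords, pvSp_count]
      by_cases hk : k ≤ xs.count ' '
      · rw [hrev, pvNthSp_append _ _ k h1 (by simpa using hk)]
        rw [ih k h1 hk, hw]
        congr 2
        simp only [List.map_cons, List.reverse_cons]
        rw [List.take_append_of_le_length (by omega)]
      · have hk' : k = xs.count ' ' + 1 := by omega
        rw [hrev, pvNthSp_last k xs.reverse h1 (by simp; omega)]
        rw [hw]
        simp only [List.map_cons, List.reverse_cons]
        rw [List.take_append_of_le_length (by omega), hk',
          (by omega : xs.count ' ' + 1 = ((pvWords ' ' xs).map List.length).reverse.length),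
          List.take_length]
        have := pvSp_sum ' ' xs
        have hc : ((pvWords ' ' xs).map List.length).length = xs.count ' ' + 1 := by
          simp [pvWords, pvSp_count]
        simp only [List.sum_reverse, List.length_reverse]
        omega
    · rw [List.count_cons_of_ne (by simp [ha])] at h2
      have hrev : (a :: xs).reverse = xs.reverse ++ [a] := by simp
      rw [hrev, pvNthSp_append _ _ k h1 (by simpa using h2), ih k h1 h2]
      congr 2
      have h1' : pvWords ' ' (a :: xs) = (a :: (pvSp ' ' xs).1) :: (pvSp ' ' xs).2 := by
        simp [pvWords, pvSp, ha]
      have h2' : pvWords ' ' xs = (pvSp ' ' xs).1 :: (pvSp ' ' xs).2 := rfl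
      rw [h1', h2']
      simp only [List.map_cons, List.reverse_cons]
      rw [List.take_append_of_le_length (by simp [pvSp_count]; omega),
        List.take_append_of_le_length (by simp [pvSp_count]; omega)]

-- negative indexing: words[-i-1] is the i-th element of the reversed list
lemma pvGet_neg {α : Type} (ws : List α) (k : Nat) (hk : k < ws.length) :
    PySem.List.pyGet? ws (-(k : Int) - 1) = some ws[ws.length - 1 - k] := by
  simp only [PySem.List.pyGet?, PySem.List.pyIdx?]
  rw [if_neg (by omega), if_pos (by omega)]
  rw [show (-(-(k : Int) - 1)).toNat = k + 1 from by omega]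
  rw [show ws.length - (k + 1) = ws.length - 1 - k from by omega]
  simp only [Option.bind_some]
  rw [List.getElem?_eq_getElem (by omega)]

-- A's foldl over range(num_words) sums the lengths of the last k words
lemma pvFold_eq (ws : List (List Char)) :
    ∀ (k : Nat) (init : Int), k ≤ ws.length →
      (PySem.List.pyRange 0 (k : Int)).foldl
        (fun d i => d + (((PySem.List.pyGet? ws (-i - 1)).getD []).length : Int)) init
      = init + (((ws.map List.length).reverse.take k).sum : Int) := by
  intro k
  induction k with
  | zero => intro init _; rw [PySem.List.pyRange_one_eq_nil (by omega)]; simp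
  | succ k ih =>
    intro init hk
    have hc : ((k + 1 : Nat) : Int) = (k : Int) + 1 := by push_cast; ring
    rw [hc, PySem.List.pyRange_one_succ_right (by omega), List.foldl_append,
      ih init (by omega)]
    simp only [List.foldl_cons, List.foldl_nil]
    rw [pvGet_neg ws k (by omega)]
    have hlt : k < ((ws.map List.length).reverse).length := by simp; omega
    rw [List.sum_take_succ _ k hlt]
    have hg : ((ws.map List.length).reverse)[k] = (ws[ws.length - 1 - k]).length := by
      rw [List.getElem_reverse]
      simp only [List.getElem_map]
      congr 1
      simp
    rw [hg]
    simp only [Option.getD_some]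
    push_cast
    ring

-- ===== VERDICT (by name: the statement is the Claim_ definition above) =====
theorem distance_to_nth_word_left_spec : Claim_equal_distance_to_nth_word_left := by
  intro text num_words _ hpre
  unfold Spec_distance_to_nth_word_left
  unfold Pre_distance_to_nth_word_left at hpre
  unfold distance_to_nth_word_left distance_to_nth_word_left_alt
  have hsp : PySem.Chars.splitOn text.toList " ".toList = pvWords ' ' text.toList :=
    pvSplitOn_eq ' ' text.toList
  have hlen : (pvWords ' ' text.toList).length = text.toList.count ' ' + 1 := by
    simp [pvWords, pvSp_count]
  rw [hsp]
  rw [if_neg (by rw [hlen]; push_cast; omega)]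
  by_cases hk : num_words ≤ 0
  · rw [PySem.List.pyRange_one_eq_nil hk, List.foldl_nil,
      pvAltGo_done _ _ _ (by omega)]
  · set kn := num_words.toNat with hkn
    have hknk : (kn : Int) = num_words := by omega
    have h1 : 1 ≤ kn := by omega
    have h2 : kn ≤ text.toList.count ' ' := by omega
    have hB : pvAltGo text.toList.reverse num_words num_words
        = num_words + pvNthSp num_words text.toList.reverse - num_words := by
      apply pvAltGo_eq_nthSp text.toList.reverse num_words num_words (by omega)
      rw [List.count_reverse]
      omega
    rw [hB, (by omega : num_words = (kn : Int)),
      pvNthSp_reverse text.toList kn h1 h2,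
      pvFold_eq (pvWords ' ' text.toList) kn (kn : Int) (by rw [hlen]; omega)]
    ring
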